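-- pv_equiv track=rewrite | github.com/rum-yasuhiro/experiments_crosstalk_multitasking | result_analysis.py | _count_each
-- ===== SOURCE A (Python) =====
-- def _count_each(multi_count):
--     bit_keys = list(multi_count.keys())
--     regs = bit_keys[0].split()
--     each_count = []
--     offset = 0
--     limit = 0
--     for register in regs[::-1]:
--         num_bit = len(register)
--         bin_list = [format(i, '0'+str(num_bit)+'b')
--                     for i in range(2**num_bit)]
--         count = {}
--         # initialize count dictionay
--         for bin_key in bin_list:
--             count[bin_key] = 0
--         limit += num_bit
--         for key, value in multi_count.items():
--             key = key.replace(" ", "")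
--             for bin_key in bin_list:
--                 if offset == 0:
--                     v = value if bin_key == key[-limit:] else 0
--                 else:
--                     v = value if bin_key == key[-limit:-offset] else 0
--                 count[bin_key] += v
--         offset += num_bit
--         each_count.append(count)
--     return each_count
-- ===== SOURCE B (Python) =====
-- def _count_each(multi_count):
--     regs = next(iter(multi_count)).split()
--     widths = [len(r) for r in reversed(regs)]
--     bounds = []
--     lo = 0
--     for w in widths:
--         bounds.append((lo, lo + w))
--         lo += w
--     # one pass over the measurements: tally every observed bit-segment per register
--     tallies = [{} for _ in widths]
--     for key, value in multi_count.items():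
--         k = key.replace(" ", "")
--         n = len(k)
--         for t, (lo, hi) in zip(tallies, bounds):
--             seg = k[max(0, n - hi):max(0, n - lo)]
--             t[seg] = t.get(seg, 0) + value
--     # readout phase: each result dict lists all patterns, looked up in the tally
--     return [{b: t.get(b, 0)
--              for i in range(2 ** w)
--              for b in [format(i, '0' + str(w) + 'b')]}
--             for w, t in zip(widths, tallies)]
-- ===== Notes on version B (the rewrite author's own statement) =====
-- stated objective: faster
-- what changed: B swaps the loop order and splits the work into two staged passes: one single pass over the measurements tallies every observed bit-segment of every register into per-register counters, then a separate readout pass builds each result dict by looking each pattern up in its counter, eliminating A's inner scan over all 2^b patterns per measurement (O(R*M + L*M + sum 2^w) vs O(R*M*2^b)).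
import Mathlib
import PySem

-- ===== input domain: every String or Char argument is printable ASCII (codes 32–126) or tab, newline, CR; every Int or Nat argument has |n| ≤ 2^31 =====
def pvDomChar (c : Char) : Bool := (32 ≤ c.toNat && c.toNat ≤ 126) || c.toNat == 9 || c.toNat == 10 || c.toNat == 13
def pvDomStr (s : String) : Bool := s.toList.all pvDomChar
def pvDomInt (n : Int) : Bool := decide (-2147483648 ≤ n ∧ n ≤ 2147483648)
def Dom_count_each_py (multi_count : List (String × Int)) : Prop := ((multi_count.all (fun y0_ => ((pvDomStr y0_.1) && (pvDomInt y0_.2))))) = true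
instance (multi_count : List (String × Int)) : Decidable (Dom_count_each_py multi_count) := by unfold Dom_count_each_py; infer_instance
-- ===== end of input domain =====

-- B swaps the loop order into two staged passes: one pass over the measurements tallies each
-- observed bit-segment into per-register counters, then a readout pass builds each result dict
-- from its counter — no inner scan over all patterns per measurement (objective: faster).

-- bin_list = [format(i, '0'+str(w)+'b') for i in range(2**w)], the comprehension both Pythons share
def pvBinList (w : Nat) : List String :=
  (PySem.List.pyRange 0 ((2 ^ w : Nat) : Int) 1).map
    (fun i => PySem.Str.zfill (PySem.Int.toBin i) (w : Int))

-- ===== PORT A =====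
-- the body of A's `for register in regs[::-1]` loop, on state (each_count, offset, limit);
-- `items` is multi_count.items()
def pvAStepFn (items : List (String × Int))
    (st : List (List (String × Int)) × Int × Int) (register : String) :
    List (List (String × Int)) × Int × Int :=
  let each_count := st.1
  let offset := st.2.1
  let limit := st.2.2
  let num_bit : Nat := register.toList.length            -- len(register)
  let bin_list := pvBinList num_bit
  -- count = {}; for bin_key in bin_list: count[bin_key] = 0
  let count : PySem.Dict String Int :=
    bin_list.foldl (fun c bk => c.insert bk 0) PySem.Dict.empty
  let limit := limit + (num_bit : Int)
  -- for key, value in multi_count.items(): key = key.replace(" ",""); for bin_key in bin_list: count[bin_key] += v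
  let count :=
    items.foldl (fun c (kv : String × Int) =>
      let key := PySem.Str.replace kv.1 " " ""
      bin_list.foldl (fun c bk =>
        c.modify bk 0 (· + (if offset = 0
          then (if bk = PySem.Str.slice key (some (-limit)) none then kv.2 else 0)
          else (if bk = PySem.Str.slice key (some (-limit)) (some (-offset)) then kv.2 else 0)))) c) count
  (each_count ++ [count.items], (offset + (num_bit : Int), limit))

-- literal transliteration of _count_each (Source A); multi_count is a Python dict,
-- read through PySem.Dict.ofList (insertion order, last value wins).
def count_each_py (multi_count : List (String × Int)) : List (List (String × Int)) :=
  let d := PySem.Dict.ofList multi_count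
  let bit_keys := d.keys                                       -- list(multi_count.keys())
  -- bit_keys[0]: total form pyGetD, admissible under Pre_ (multi_count ≠ [])
  let regs := PySem.Str.split₀ (PySem.List.pyGetD bit_keys 0 "")
  -- for register in regs[::-1]:  (slice with step -1)
  let st := ((PySem.List.slice? regs none none (-1)).getD []).foldl (pvAStepFn d.items) ([], (0, 0))
  st.1

-- ===== PORT B =====
-- helpers follow Source B: seg = k[max(0, n - hi):max(0, n - lo)]; t[seg] = t.get(seg, 0) + value
def pvSeg (lo hi : Int) (kv : String × Int) : String :=
  let k := PySem.Str.replace kv.1 " " ""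
  let n : Int := (k.toList.length : Int)
  PySem.Str.slice k (some (max 0 (n - hi))) (some (max 0 (n - lo)))

def pvBump (kv : String × Int) (t : PySem.Dict String Int) (b : Int × Int) : PySem.Dict String Int :=
  let seg := pvSeg b.1 b.2 kv
  t.insert seg (t.getD seg 0 + kv.2)

def count_each_py_alt (multi_count : List (String × Int)) : List (List (String × Int)) :=
  let d := PySem.Dict.ofList multi_count
  let regs := PySem.Str.split₀ (PySem.List.pyGetD d.keys 0 "")   -- next(iter(multi_count)).split()
  let widths : List Nat := regs.reverse.map (fun r => r.toList.length)
  -- bounds = []; lo = 0; for w in widths: bounds.append((lo, lo+w)); lo += w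
  let bounds : List (Int × Int) :=
    (widths.foldl (fun (st : List (Int × Int) × Int) (w : Nat) =>
      (st.1 ++ [(st.2, st.2 + (w : Int))], st.2 + (w : Int))) ([], 0)).1
  -- tallies = [{} for _ in widths]; single pass over items bumping every register's counter
  let init : List (PySem.Dict String Int) := widths.map (fun _ => PySem.Dict.empty)
  let tallies :=
    d.items.foldl (fun ts kv => (ts.zip bounds).map (fun tb => pvBump kv tb.1 tb.2)) init
  -- readout: [{bk: t.get(bk, 0) for bk in bin_list} for w, t in zip(widths, tallies)]
  (widths.zip tallies).map (fun wt =>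
    ((pvBinList wt.1).foldl
      (fun (c : PySem.Dict String Int) bk => c.insert bk (wt.2.getD bk 0)) PySem.Dict.empty).items)

-- ===== PRECONDITION & SPEC =====
-- Pre_ excludes only the empty dict, on which A raises IndexError (bit_keys[0])
-- and B raises StopIteration (next(iter(multi_count))).
def Pre_count_each_py (multi_count : List (String × Int)) : Prop := multi_count ≠ []
instance (multi_count : List (String × Int)) : Decidable (Pre_count_each_py multi_count) := by
  unfold Pre_count_each_py; infer_instance

def pvWitness_count_each_py : (List (String × Int)) := [("01 1", 3), ("00 0", 2)]

def Spec_count_each_py (multi_count : List (String × Int)) (out : List (List (String × Int))) : Prop :=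
  out = count_each_py_alt multi_count
instance (multi_count : List (String × Int)) (out : List (List (String × Int))) : Decidable (Spec_count_each_py multi_count out) := by
  unfold Spec_count_each_py; infer_instance

-- ===== CLAIM (what is proved, stated in full; the proofs are below) =====
def Claim_equal_count_each_py : Prop := ∀ (multi_count : List (String × Int)), Dom_count_each_py multi_count → Pre_count_each_py multi_count → Spec_count_each_py multi_count (count_each_py multi_count)

-- ===== LEMMAS AND PROOFS =====

-- the (lo, width) pair of every register, left to right over the reversed register list
def pvOffs : List Nat → Int → List (Int × Nat)
  | [], _ => []
  | w :: ws, lo => (lo, w) :: pvOffs ws (lo + w)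

-- the canonical per-register result both ports are reduced to
def pvSum (lo hi : Int) (items : List (String × Int)) (bk : String) : Int :=
  items.foldl (fun a kv => a + (if pvSeg lo hi kv = bk then kv.2 else 0)) 0

def pvCanon (items : List (String × Int)) (w : Nat) (lo : Int) : List (String × Int) :=
  (pvBinList w).map (fun bk => (bk, pvSum lo (lo + (w : Int)) items bk))

-- ---- bin_list is duplicate-free ----
def pvBin (n : Nat) : List Char :=
  if _h : n < 2 then [Nat.digitChar n]
  else pvBin (n / 2) ++ [Nat.digitChar (n % 2)]
decreasing_by exact Nat.div_lt_self (by omega) (by omega)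

lemma pvBin_ne_nil (n : Nat) : pvBin n ≠ [] := by
  rw [pvBin]; split <;> simp

lemma pvBin_mem (n : Nat) : ∀ c ∈ pvBin n, c = '0' ∨ c = '1' := by
  induction n using Nat.strong_induction_on with
  | _ n ih =>
    rw [pvBin]; split
    · next h =>
      intro c hc
      simp only [List.mem_singleton] at hc
      subst hc
      have : n = 0 ∨ n = 1 := by omega
      rcases this with rfl | rfl
      · left; decide
      · right; decide
    · next h =>
      intro c hc
      rw [List.mem_append] at hc
      rcases hc with hc | hc
      · exact ih (n / 2) (Nat.div_lt_self (by omega) (by omega)) c hc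
      · simp only [List.mem_singleton] at hc
        subst hc
        have : n % 2 = 0 ∨ n % 2 = 1 := by omega
        rcases this with h2 | h2 <;> rw [h2]
        · left; decide
        · right; decide

lemma pv_toDigitsCore_eq : ∀ (fuel n : Nat) (ds : List Char), n < fuel →
    Nat.toDigitsCore 2 fuel n ds = pvBin n ++ ds := by
  intro fuel
  induction fuel with
  | zero => intro n ds h; omega
  | succ fuel ih =>
    intro n ds h
    rw [Nat.toDigitsCore]
    by_cases h2 : n / 2 = 0
    · have hn : n < 2 := by omega
      rw [if_pos h2, pvBin, dif_pos hn]
      have : n % 2 = n := Nat.mod_eq_of_lt hn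
      rw [this]
      rfl
    · have h3 : n ≥ 2 := by omega
      have hlt : n / 2 < fuel := by
        have : n / 2 < n := Nat.div_lt_self (by omega) (by omega)
        omega
      rw [if_neg h2, ih (n / 2) (Nat.digitChar (n % 2) :: ds) hlt]
      conv_rhs => rw [pvBin]
      rw [dif_neg (by omega), List.append_assoc]
      rfl

lemma pv_toDigits_eq (n : Nat) : Nat.toDigits 2 n = pvBin n := by
  show Nat.toDigitsCore 2 (n + 1) n [] = pvBin n
  rw [pv_toDigitsCore_eq (n + 1) n [] (by omega), List.append_nil]

lemma pvVal_replicate (k : Nat) (cs : List Char) :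
    List.foldl (fun a c => 2 * a + (if c = '1' then 1 else 0)) 0 (List.replicate k '0' ++ cs)
      = List.foldl (fun a c => 2 * a + (if c = '1' then 1 else 0)) 0 cs := by
  induction k with
  | zero => rfl
  | succ k ih =>
    rw [List.replicate_succ, List.cons_append, List.foldl_cons]
    exact ih

lemma pvVal_pvBin (n : Nat) :
    List.foldl (fun a c => 2 * a + (if c = '1' then 1 else 0)) 0 (pvBin n) = n := by
  induction n using Nat.strong_induction_on with
  | _ n ih =>
    rw [pvBin]; split
    · next h =>
      have : n = 0 ∨ n = 1 := by omega
      rcases this with rfl | rfl <;> decide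
    · next h =>
      rw [List.foldl_append, ih (n / 2) (Nat.div_lt_self (by omega) (by omega)),
        List.foldl_cons, List.foldl_nil]
      show 2 * (n / 2) + (if Nat.digitChar (n % 2) = '1' then 1 else 0) = n
      have hd : (if Nat.digitChar (n % 2) = '1' then (1 : Nat) else 0) = n % 2 := by
        have h2 : n % 2 = 0 ∨ n % 2 = 1 := by omega
        rcases h2 with h2 | h2 <;> rw [h2] <;> decide
      rw [hd]
      omega

lemma pv_zfill_pvBin (n : Nat) (w : Int) :
    PySem.Chars.zfill (pvBin n) w = List.replicate (w.toNat - (pvBin n).length) '0' ++ pvBin n := by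
  obtain ⟨c, cs, hcons⟩ : ∃ c cs, pvBin n = c :: cs := by
    cases h : pvBin n with
    | nil => exact absurd h (pvBin_ne_nil n)
    | cons c cs => exact ⟨c, cs, rfl⟩
  have hc : c = '0' ∨ c = '1' := pvBin_mem n c (hcons ▸ List.mem_cons_self ..)
  have hcsign : ¬ (c = '+' ∨ c = '-') := by rcases hc with rfl | rfl <;> decide
  rw [hcons]
  unfold PySem.Chars.zfill
  split_ifs with h1
  · have : w.toNat - (c :: cs).length = 0 := by
      have := Int.toNat_le.mpr h1
      omega
    rw [this, List.replicate_zero, List.nil_append]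
  · show (if c = '+' ∨ c = '-'
        then c :: (List.replicate (w.toNat - (c :: cs).length) '0' ++ cs)
        else List.replicate (w.toNat - (c :: cs).length) '0' ++ c :: cs)
      = List.replicate (w.toNat - (c :: cs).length) '0' ++ c :: cs
    rw [if_neg hcsign]

lemma pv_key_val (w : Int) (n : Nat) :
    List.foldl (fun a c => 2 * a + (if c = '1' then 1 else 0)) 0
      ((PySem.Str.zfill (PySem.Int.toBin (n : Int)) w).toList) = n := by
  rw [PySem.Str.toList_zfill, PySem.Int.toList_toBin]
  have hbin : PySem.Int.toBinChars (n : Int) = pvBin n := by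
    unfold PySem.Int.toBinChars
    rw [if_neg (by omega), Int.toNat_natCast, pv_toDigits_eq]
  rw [hbin, pv_zfill_pvBin, pvVal_replicate, pvVal_pvBin]

lemma pv_zfill_toBin_injective (w : Int) :
    Function.Injective (fun n : Nat => PySem.Str.zfill (PySem.Int.toBin (n : Int)) w) := by
  intro i j h
  have h' := congrArg String.toList h
  have hi := pv_key_val w i
  have hj := pv_key_val w j
  rw [h'] at hi
  exact hi.symm.trans hj

lemma pv_binlist_nodup (w : Nat) : (pvBinList w).Nodup := by
  unfold pvBinList
  rw [PySem.List.pyRange_zero_natCast, List.map_map]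
  exact List.Nodup.map (pv_zfill_toBin_injective (w : Int)) List.nodup_range

-- ---- words produced by str.split() are nonempty ----
lemma pv_split_go_ne_nil : ∀ (s cur : List Char) (acc : List (List Char)),
    (∀ x ∈ acc, x ≠ []) → ∀ x ∈ PySem.Chars.split₀.go s cur acc, x ≠ [] := by
  intro s
  induction s with
  | nil =>
    intro cur acc hacc x hx
    unfold PySem.Chars.split₀.go at hx
    split at hx
    · exact hacc x (List.mem_reverse.mp hx)
    · next h =>
      rcases List.mem_cons.mp (List.mem_reverse.mp hx) with h1 | h1
      · subst h1
        intro hc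
        exact h (by simpa using congrArg List.isEmpty hc)
      · exact hacc x h1
  | cons c rest ih =>
    intro cur acc hacc x hx
    unfold PySem.Chars.split₀.go at hx
    split at hx
    · split at hx
      · exact ih [] acc hacc x hx
      · next h =>
        refine ih [] (cur.reverse :: acc) ?_ x hx
        intro y hy
        rcases List.mem_cons.mp hy with hy | hy
        · subst hy
          intro hc
          exact h (by simpa using congrArg List.isEmpty hc)
        · exact hacc y hy
    · exact ih (c :: cur) acc hacc x hx

lemma pv_split_word_ne_nil (s : String) : ∀ r ∈ PySem.Str.split₀ s, r.toList ≠ [] := by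
  intro r hr
  unfold PySem.Str.split₀ at hr
  rcases List.mem_map.mp hr with ⟨w, hw, rfl⟩
  have hne : w ≠ [] := by
    unfold PySem.Chars.split₀ at hw
    exact pv_split_go_ne_nil s.toList [] [] (by intro x hx; cases hx) w hw
  simpa using hne

-- ---- the two slice expressions agree (0 ≤ lo < hi) ----
lemma pv_clamp_neg (n : Nat) (k : Int) (hk : 0 < k) :
    PySem.List.clampIdx n (-k) = (max 0 ((n : Int) - k)).toNat := by
  unfold PySem.List.clampIdx
  split_ifs <;> omega

lemma pv_slice_eq_list (xs : List Char) (lo hi : Int) (h0 : 0 ≤ lo) (hlh : lo < hi) :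
    PySem.List.slice xs (some (max 0 ((xs.length : Int) - hi))) (some (max 0 ((xs.length : Int) - lo)))
      = if lo = 0 then PySem.List.slice xs (some (-hi)) none
        else PySem.List.slice xs (some (-hi)) (some (-lo)) := by
  have hh : 0 < hi := by omega
  rw [PySem.List.slice_toNat xs (le_max_left _ _) (le_max_left _ _)]
  rcases eq_or_ne lo 0 with rfl | hlo
  · rw [if_pos rfl, PySem.List.slice_some_none, pv_clamp_neg xs.length hi hh]
    have hb : (max 0 ((xs.length : Int) - 0)).toNat = xs.length := by omega
    rw [hb]
    exact List.take_of_length_le (by simp)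
  · rw [if_neg hlo]
    show _ = List.take (PySem.List.clampIdx xs.length (-lo) - PySem.List.clampIdx xs.length (-hi))
      (List.drop (PySem.List.clampIdx xs.length (-hi)) xs)
    rw [pv_clamp_neg xs.length hi hh, pv_clamp_neg xs.length lo (by omega)]

lemma pv_seg_eq (lo hi : Int) (h0 : 0 ≤ lo) (hlh : lo < hi) (kv : String × Int) :
    pvSeg lo hi kv
      = (if lo = 0
          then PySem.Str.slice (PySem.Str.replace kv.1 " " "") (some (-hi)) none
          else PySem.Str.slice (PySem.Str.replace kv.1 " " "") (some (-hi)) (some (-lo))) := by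
  apply String.toList_inj.mp
  unfold pvSeg
  split_ifs with h <;>
    simp only [PySem.Str.toList_slice, PySem.Chars.slice_eq_listSlice] <;>
    rw [pv_slice_eq_list _ lo hi h0 hlh] <;> simp [h]

-- ---- building a dict over a duplicate-free key list ----
lemma pv_build_getD (l : List String) (f : String → Int) :
    ∀ (d : PySem.Dict String Int) (s : String), l.Nodup →
      (l.foldl (fun c bk => c.insert bk (f bk)) d).getD s 0
        = if s ∈ l then f s else d.getD s 0 := by
  induction l with
  | nil => intro d s _; simp
  | cons bk l ih =>
    intro d s hnd
    rw [List.foldl_cons, ih _ s hnd.of_cons]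
    by_cases hs : s ∈ l
    · rw [if_pos hs, if_pos (List.mem_cons_of_mem _ hs)]
    · rw [if_neg hs, PySem.Dict.getD_insert]
      by_cases hsb : s = bk
      · rw [if_pos hsb, if_pos (by simp [hsb])]
        rw [hsb]
      · rw [if_neg hsb, if_neg (by simp [hsb, hs])]

lemma pv_build_keys (l : List String) (hl : l.Nodup) (f : String → Int) :
    (l.foldl (fun (c : PySem.Dict String Int) bk => c.insert bk (f bk)) PySem.Dict.empty).keys = l := by
  have h := PySem.Dict.keys_foldl_insert (κ := String) (ν := Int) l
    (fun c bk => f bk) PySem.Dict.empty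
  rw [PySem.Dict.keys_empty, PySem.Set.update_nil_left,
    PySem.Set.ofList_eq_self_of_nodup _ hl] at h
  exact h

lemma pv_build_items (l : List String) (hl : l.Nodup) (f : String → Int) :
    (l.foldl (fun (c : PySem.Dict String Int) bk => c.insert bk (f bk)) PySem.Dict.empty).items
      = l.map (fun bk => (bk, f bk)) := by
  rw [PySem.Dict.items_eq_map_keys _ (by rw [pv_build_keys l hl f]; exact hl) 0,
    pv_build_keys l hl f]
  apply List.map_congr_left
  intro x hx
  rw [pv_build_getD l f PySem.Dict.empty x hl, if_pos hx]

-- ---- A's inner scan over the whole bin_list, characterised ----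
lemma pv_scan_all (m : List String) (g : String → Int) :
    ∀ (c : PySem.Dict String Int), m.Nodup → (∀ x ∈ m, c.contains x = true) →
      ((m.foldl (fun c bk => c.modify bk 0 (· + g bk)) c).keys = c.keys
        ∧ ∀ s, (m.foldl (fun c bk => c.modify bk 0 (· + g bk)) c).getD s 0
            = c.getD s 0 + (if s ∈ m then g s else 0)) := by
  induction m with
  | nil => intro c _ _; exact ⟨rfl, by simp⟩
  | cons bk m ih =>
    intro c hnd hcont
    have hcbk : c.contains bk = true := hcont bk (List.mem_cons_self ..)
    have hcont' : ∀ x ∈ m, (c.modify bk 0 (· + g bk)).contains x = true := by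
      intro x hx
      rw [PySem.Dict.contains_modify]
      simp [hcont x (List.mem_cons_of_mem _ hx)]
    obtain ⟨hk, hg⟩ := ih (c.modify bk 0 (· + g bk)) hnd.of_cons hcont'
    have hkm : (c.modify bk 0 (· + g bk)).keys = c.keys := by
      rw [PySem.Dict.keys_modify, PySem.Dict.keys_insert_of_contains c _ hcbk]
    constructor
    · rw [List.foldl_cons, hk, hkm]
    · intro s
      rw [List.foldl_cons, hg s, PySem.Dict.getD_modify]
      have hbkm : bk ∉ m := (List.nodup_cons.mp hnd).1
      by_cases hs : s = bk
      · subst hs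
        rw [if_pos rfl, if_neg hbkm, if_pos (List.mem_cons_self ..)]
        ring
      · rw [if_neg hs]
        by_cases hsm : s ∈ m
        · rw [if_pos hsm, if_pos (List.mem_cons_of_mem _ hsm)]
        · rw [if_neg hsm, if_neg (by simp [hs, hsm])]

-- ---- A's items loop, characterised ----
lemma pv_A_items (l : List String) (hl : l.Nodup) (gA : (String × Int) → String → Int) :
    ∀ (items : List (String × Int)) (c : PySem.Dict String Int), c.keys = l →
      ((items.foldl (fun c kv => l.foldl (fun c bk => c.modify bk 0 (· + gA kv bk)) c) c).keys = l
        ∧ ∀ bk ∈ l, (items.foldl (fun c kv => l.foldl (fun c bk => c.modify bk 0 (· + gA kv bk)) c) c).getD bk 0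
            = items.foldl (fun a kv => a + gA kv bk) (c.getD bk 0)) := by
  intro items
  induction items with
  | nil => intro c hk; exact ⟨hk, fun bk _ => rfl⟩
  | cons kv items ih =>
    intro c hk
    have hcont : ∀ x ∈ l, c.contains x = true := by
      intro x hx
      rw [PySem.Dict.contains_iff_mem_keys, hk]
      exact hx
    obtain ⟨hk1, hg1⟩ := pv_scan_all l (gA kv) c hl hcont
    obtain ⟨hk2, hg2⟩ := ih _ (hk1.trans hk)
    constructor
    · rw [List.foldl_cons]; exact hk2
    · intro bk hbk
      rw [List.foldl_cons, hg2 bk hbk, hg1 bk, if_pos hbk, List.foldl_cons]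

-- ---- B's tally, characterised ----
lemma pv_tally_getD (b : Int × Int) :
    ∀ (items : List (String × Int)) (t : PySem.Dict String Int) (s : String),
      (items.foldl (fun t kv => pvBump kv t b) t).getD s 0
        = items.foldl (fun a kv => a + (if pvSeg b.1 b.2 kv = s then kv.2 else 0)) (t.getD s 0) := by
  intro items
  induction items with
  | nil => intro t s; rfl
  | cons kv items ih =>
    intro t s
    rw [List.foldl_cons, List.foldl_cons, ih]
    have hb : (pvBump kv t b).getD s 0
        = t.getD s 0 + (if pvSeg b.1 b.2 kv = s then kv.2 else 0) := by
      unfold pvBump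
      rw [PySem.Dict.getD_insert]
      by_cases hs : s = pvSeg b.1 b.2 kv
      · rw [if_pos hs, if_pos hs.symm, hs]
      · rw [if_neg hs, if_neg (fun h => hs h.symm), add_zero]
    rw [hb]

-- ---- B's simultaneous pass projects to independent per-register passes ----
lemma pv_proj {γ : Type} (P : List γ) (g : γ → Int × Int) :
    ∀ (items : List (String × Int)) (f : γ → PySem.Dict String Int),
      items.foldl (fun ts kv => (ts.zip (P.map g)).map (fun tb => pvBump kv tb.1 tb.2)) (P.map f)
        = P.map (fun p => items.foldl (fun t kv => pvBump kv t (g p)) (f p)) := by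
  intro items
  induction items with
  | nil => intro f; rfl
  | cons kv items ih =>
    intro f
    rw [List.foldl_cons, List.zip_map', List.map_map]
    have := ih (fun p => pvBump kv (f p) (g p))
    rw [show ((fun tb : PySem.Dict String Int × (Int × Int) => pvBump kv tb.1 tb.2) ∘
        (fun p => (f p, g p))) = (fun p => pvBump kv (f p) (g p)) from rfl]
    rw [this]
    apply List.map_congr_left
    intro p _
    rw [List.foldl_cons]

-- ---- A's register body equals the canonical register result ----
lemma pv_A_register (items : List (String × Int)) (w : Nat) (lo : Int) (h0 : 0 ≤ lo) (hw : 0 < w) :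
    (items.foldl
      (fun c (kv : String × Int) =>
        (pvBinList w).foldl
          (fun c bk =>
            c.modify bk 0
              (· + (if lo = 0
                then (if bk = PySem.Str.slice (PySem.Str.replace kv.1 " " "") (some (-(lo + (w : Int)))) none then kv.2 else 0)
                else (if bk = PySem.Str.slice (PySem.Str.replace kv.1 " " "") (some (-(lo + (w : Int)))) (some (-lo)) then kv.2 else 0))))
          c)
      ((pvBinList w).foldl (fun c bk => c.insert bk 0) PySem.Dict.empty)).items
    = pvCanon items w lo := by
  have hl := pv_binlist_nodup w
  have hkeys := pv_build_keys (pvBinList w) hl (fun _ => 0)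
  obtain ⟨hk2, hgetD⟩ := pv_A_items (pvBinList w) hl
    (fun kv bk => if lo = 0
      then (if bk = PySem.Str.slice (PySem.Str.replace kv.1 " " "") (some (-(lo + (w : Int)))) none then kv.2 else 0)
      else (if bk = PySem.Str.slice (PySem.Str.replace kv.1 " " "") (some (-(lo + (w : Int)))) (some (-lo)) then kv.2 else 0))
    items _ hkeys
  rw [PySem.Dict.items_eq_map_keys _ (by rw [hk2]; exact hl) 0, hk2]
  unfold pvCanon
  apply List.map_congr_left
  intro bk hbk
  rw [hgetD bk hbk, pv_build_getD (pvBinList w) (fun _ => 0) PySem.Dict.empty bk hl, if_pos hbk]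
  unfold pvSum
  have hseg := pv_seg_eq lo (lo + (w : Int)) h0 (by omega)
  refine congrArg (fun v => (bk, v)) ?_
  refine PySem.List.foldl_congr_mem items _ _ 0 ?_
  intro a kv _
  rw [hseg kv]
  rcases eq_or_ne lo 0 with rfl | hlo
  · rw [if_pos rfl, if_pos rfl]
    by_cases h : bk = PySem.Str.slice (PySem.Str.replace kv.1 " " "") (some (-(0 + (w : Int)))) none
    · rw [if_pos h, if_pos h.symm]
    · rw [if_neg h, if_neg (fun hh => h hh.symm)]
  · rw [if_neg hlo, if_neg hlo]
    by_cases h : bk = PySem.Str.slice (PySem.Str.replace kv.1 " " "") (some (-(lo + (w : Int)))) (some (-lo))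
    · rw [if_pos h, if_pos h.symm]
    · rw [if_neg h, if_neg (fun hh => h hh.symm)]

-- ---- A's outer loop over the reversed registers ----
lemma pv_A_outer (items : List (String × Int)) :
    ∀ (rs : List String) (acc : List (List (String × Int))) (off : Int), 0 ≤ off →
      (∀ r ∈ rs, r.toList ≠ []) →
      (rs.foldl (pvAStepFn items) (acc, (off, off))).1
        = acc ++ (pvOffs (rs.map (fun r => r.toList.length)) off).map
            (fun p => pvCanon items p.2 p.1) := by
  intro rs
  induction rs with
  | nil => intro acc off _ _; simp [pvOffs]
  | cons r rs ih =>
    intro acc off h0 hw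
    have hw1 : 0 < r.toList.length :=
      List.length_pos_of_ne_nil (hw r (List.mem_cons_self ..))
    have hstep : pvAStepFn items (acc, (off, off)) r
        = (acc ++ [pvCanon items r.toList.length off],
           (off + (r.toList.length : Int), off + (r.toList.length : Int))) := by
      have hreg := pv_A_register items r.toList.length off h0 hw1
      simp only [pvAStepFn]
      rw [hreg]
    rw [List.foldl_cons, hstep,
      ih _ _ (by omega) (fun x hx => hw x (List.mem_cons_of_mem _ hx))]
    simp [pvOffs]

-- ---- B's bounds loop ----
lemma pv_B_bounds (ws : List Nat) :
    ∀ (acc : List (Int × Int)) (lo : Int),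
      (ws.foldl (fun (st : List (Int × Int) × Int) (w : Nat) =>
        (st.1 ++ [(st.2, st.2 + (w : Int))], st.2 + (w : Int))) (acc, lo)).1
      = acc ++ (pvOffs ws lo).map (fun p => (p.1, p.1 + (p.2 : Int))) := by
  induction ws with
  | nil => intro acc lo; simp [pvOffs]
  | cons w ws ih =>
    intro acc lo
    rw [List.foldl_cons, ih]
    simp [pvOffs]

lemma pv_offs_map_snd (ws : List Nat) (lo : Int) : (pvOffs ws lo).map (·.2) = ws := by
  induction ws generalizing lo with
  | nil => rfl
  | cons w ws ih => simp [pvOffs, ih]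

-- ---- B's register readout equals the canonical register result ----
lemma pv_B_register (items : List (String × Int)) (w : Nat) (lo : Int) :
    ((pvBinList w).foldl
      (fun (c : PySem.Dict String Int) bk =>
        c.insert bk ((items.foldl (fun t kv => pvBump kv t (lo, lo + (w : Int))) PySem.Dict.empty).getD bk 0))
      PySem.Dict.empty).items
    = pvCanon items w lo := by
  rw [pv_build_items (pvBinList w) (pv_binlist_nodup w)
    (fun bk => (items.foldl (fun t kv => pvBump kv t (lo, lo + (w : Int))) PySem.Dict.empty).getD bk 0)]
  unfold pvCanon
  apply List.map_congr_left
  intro bk _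
  rw [pv_tally_getD (lo, lo + (w : Int)) items PySem.Dict.empty bk, PySem.Dict.getD_empty]
  rfl

-- ---- B's whole pipeline, over an arbitrary width list ----
lemma pv_B_all (items : List (String × Int)) (ws : List Nat) :
    ((ws.zip (items.foldl
        (fun ts kv => (ts.zip ((ws.foldl (fun (st : List (Int × Int) × Int) (w : Nat) =>
            (st.1 ++ [(st.2, st.2 + (w : Int))], st.2 + (w : Int))) ([], 0)).1)).map
          (fun tb => pvBump kv tb.1 tb.2))
        (ws.map (fun _ => (PySem.Dict.empty : PySem.Dict String Int))))).map
      (fun wt => ((pvBinList wt.1).foldl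
        (fun (c : PySem.Dict String Int) bk => c.insert bk (wt.2.getD bk 0)) PySem.Dict.empty).items))
    = (pvOffs ws 0).map (fun p => pvCanon items p.2 p.1) := by
  set P := pvOffs ws 0 with hP
  rw [show (ws.foldl (fun (st : List (Int × Int) × Int) (w : Nat) =>
        (st.1 ++ [(st.2, st.2 + (w : Int))], st.2 + (w : Int))) ([], 0)).1
      = P.map (fun p => (p.1, p.1 + (p.2 : Int))) from by
    simpa using pv_B_bounds ws [] 0]
  rw [show ws.map (fun _ => (PySem.Dict.empty : PySem.Dict String Int))
      = P.map (fun _ => PySem.Dict.empty) from by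
    conv_lhs => rw [← pv_offs_map_snd ws 0]
    rw [List.map_map]
    rfl]
  rw [pv_proj P (fun p => (p.1, p.1 + (p.2 : Int))) items (fun _ => PySem.Dict.empty)]
  conv_lhs => rw [← pv_offs_map_snd ws 0]
  rw [List.zip_map', List.map_map]
  apply List.map_congr_left
  intro p _
  exact pv_B_register items p.2 p.1

-- ===== VERDICT (by name: the statement is the Claim_ definition above) =====
theorem count_each_py_spec : Claim_equal_count_each_py := by
  intro multi_count _dom _pre
  unfold Spec_count_each_py
  simp only [count_each_py, count_each_py_alt, PySem.List.slice?_none_none_neg_one,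
    Option.getD_some]
  have hwords : ∀ r ∈ (PySem.Str.split₀ (PySem.List.pyGetD
      (PySem.Dict.ofList multi_count).keys 0 "")).reverse, r.toList ≠ [] := by
    intro r hr
    exact pv_split_word_ne_nil _ r (List.mem_reverse.mp hr)
  have hA := pv_A_outer (PySem.Dict.ofList multi_count).items
    (PySem.Str.split₀ (PySem.List.pyGetD (PySem.Dict.ofList multi_count).keys 0 "")).reverse
    [] 0 le_rfl hwords
  rw [List.nil_append] at hA
  have hB := pv_B_all (PySem.Dict.ofList multi_count).items
    ((PySem.Str.split₀ (PySem.List.pyGetD (PySem.Dict.ofList multi_count).keys 0 "")).reverse.map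
      (fun r => r.toList.length))
  exact hA.trans hB.symm
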